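-- pv_equiv track=rewrite | github.com/damarisarmoa12/Intro | parcialpython.py | torneo_de_gallina
-- ===== SOURCE A (Python) =====
-- def torneo_de_gallina (estrategia : dict[str,str]) -> dict[str,int]:
--     res = {}
--
--     for  jugador in estrategia :  #empieza los puntajes en 0
--         res[jugador] = 0
--
--     jugadores = list(estrategia.keys()) #extrae las claves como una lista
--
--
--     for jugador1 in jugadores: #busca un elemento en jugadores (que son la lista de claves del diccionario)
--         for jugador2 in jugadores:  #busca otro elemento
--             if jugador1 < jugador2: #para que no se repitan
--                 estrategia1 = estrategia[jugador1] #abrimos una variable de estrategia1 que sea igual a la estrategia del jugador 1 en el diccionario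
--                 estrategia2 = estrategia[jugador2]
--
--                 if estrategia1 == "Me desvio siempre" and estrategia2 == "Me la banco y no me desvio":
--                     res[jugador1] -= 15
--                     res[jugador2] += 10
--                 elif estrategia1 == "Me la banco y no me desvio" and estrategia2 == "Me la banco y no me desvio":
--                     res[jugador1] -= 5
--                     res[jugador2] -= 5
--                 elif estrategia1 == "Me desvio siempre" and estrategia2 == "Me desvio siempre":
--                     res[jugador1] -= 10
--                     res[jugador2] -= 10
--                 elif estrategia1 == "Me la banco y no me desvio" and estrategia2 == "Me desvio siempre":
--                     res[jugador1] += 10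
--                     res[jugador2] -= 15
--     return res
-- ===== SOURCE B (Python) =====
-- def torneo_de_gallina(estrategia):
--     D = "Me desvio siempre"
--     S = "Me la banco y no me desvio"
--     vals = list(estrategia.values())
--     nD = vals.count(D)
--     nS = vals.count(S)
--     res = {}
--     for jugador, s in estrategia.items():
--         if s == D:
--             res[jugador] = -10 * (nD - 1) - 15 * nS
--         elif s == S:
--             res[jugador] = 10 * nD - 5 * (nS - 1)
--         else:
--             res[jugador] = 0
--     return res
-- ===== Notes on version B (the rewrite author's own statement) =====
-- stated objective: faster
-- what changed: Replaces the O(n^2) all-pairs double loop over players by a single pass that counts how many players use each of the two named strategies and computes every player's score in closed form from those two counts.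
import Mathlib
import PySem

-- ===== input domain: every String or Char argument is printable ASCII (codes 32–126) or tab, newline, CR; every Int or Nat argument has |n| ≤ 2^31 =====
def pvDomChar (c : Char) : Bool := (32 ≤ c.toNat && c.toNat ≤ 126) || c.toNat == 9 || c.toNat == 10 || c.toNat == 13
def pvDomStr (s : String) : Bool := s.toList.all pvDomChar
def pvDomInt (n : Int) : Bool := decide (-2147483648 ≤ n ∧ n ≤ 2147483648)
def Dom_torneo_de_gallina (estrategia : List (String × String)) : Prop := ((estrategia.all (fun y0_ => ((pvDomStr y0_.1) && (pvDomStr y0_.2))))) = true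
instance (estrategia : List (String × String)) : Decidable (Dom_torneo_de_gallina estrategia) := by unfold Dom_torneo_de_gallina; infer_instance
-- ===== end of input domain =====

-- B replaces A's O(n^2) all-pairs double loop by one pass computing each score in closed
-- form from the counts of the two named strategies (objective: faster, asymptotic).

-- ===== PORT A =====
-- Literal port of A: res initialised to 0 per key, then the quadratic double loop over the
-- key list, scoring each pair once under the 'jugador1 < jugador2' guard.  Python's str '<'
-- is codepoint-lexicographic, which is exactly '<' on the .toList character lists (String's
-- own Decidable '<' instance is not kernel-reducible, the List Char one is).  The lookups
-- estrategia[jugador] are ported as getD with a dummy default: the key is always present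
-- (it comes from estrategia's own key list), so KeyError is unreachable and getD is exact.
def torneo_de_gallina (estrategia : List (String × String)) : List (String × Int) :=
  let ed : PySem.Dict String String := PySem.Dict.mk estrategia
  let res0 : PySem.Dict String Int :=
    ed.keys.foldl (fun r jugador => r.insert jugador 0) PySem.Dict.empty
  let jugadores := ed.keys
  let res :=
    jugadores.foldl (fun r jugador1 =>
      jugadores.foldl (fun r jugador2 =>
        if jugador1.toList < jugador2.toList then
          let estrategia1 := ed.getD jugador1 ""
          let estrategia2 := ed.getD jugador2 ""
          if estrategia1 == "Me desvio siempre" && estrategia2 == "Me la banco y no me desvio" then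
            (r.modify jugador1 0 (fun v => v - 15)).modify jugador2 0 (fun v => v + 10)
          else if estrategia1 == "Me la banco y no me desvio" && estrategia2 == "Me la banco y no me desvio" then
            (r.modify jugador1 0 (fun v => v - 5)).modify jugador2 0 (fun v => v - 5)
          else if estrategia1 == "Me desvio siempre" && estrategia2 == "Me desvio siempre" then
            (r.modify jugador1 0 (fun v => v - 10)).modify jugador2 0 (fun v => v - 10)
          else if estrategia1 == "Me la banco y no me desvio" && estrategia2 == "Me desvio siempre" then
            (r.modify jugador1 0 (fun v => v + 10)).modify jugador2 0 (fun v => v - 15)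
          else r
        else r) r) res0
  res.items

-- ===== PORT B =====
-- Literal port of Source B: count both strategies once over the values, then a single pass
-- assigning each player's score in closed form from the two counts.
def torneo_de_gallina_alt (estrategia : List (String × String)) : List (String × Int) :=
  let ed : PySem.Dict String String := PySem.Dict.mk estrategia
  let vals := ed.values
  let nD : Int := vals.count "Me desvio siempre"
  let nS : Int := vals.count "Me la banco y no me desvio"
  let res : PySem.Dict String Int :=
    ed.items.foldl (fun r p =>
      r.insert p.1
        (if p.2 == "Me desvio siempre" then -10 * (nD - 1) - 15 * nS
         else if p.2 == "Me la banco y no me desvio" then 10 * nD - 5 * (nS - 1)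
         else 0)) PySem.Dict.empty
  res.items

-- ===== PRECONDITION & SPEC =====
-- Pre_ excludes only association lists with duplicate keys, which cannot arise from the
-- Python argument (a dict has unique keys); A is total on every actual dict.
def Pre_torneo_de_gallina (estrategia : List (String × String)) : Prop :=
  (estrategia.map Prod.fst).Nodup
instance (estrategia : List (String × String)) : Decidable (Pre_torneo_de_gallina estrategia) := by
  unfold Pre_torneo_de_gallina; infer_instance

def pvWitness_torneo_de_gallina : (List (String × String)) :=
  [("ana", "Me desvio siempre"), ("beto", "Me la banco y no me desvio")]

def Spec_torneo_de_gallina (estrategia : List (String × String)) (out : List (String × Int)) : Prop := out = torneo_de_gallina_alt estrategia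
instance (estrategia : List (String × String)) (out : List (String × Int)) : Decidable (Spec_torneo_de_gallina estrategia out) := by unfold Spec_torneo_de_gallina; infer_instance

-- ===== CLAIM (what is proved, stated in full; the proofs are below) =====
def Claim_equal_torneo_de_gallina : Prop := ∀ (estrategia : List (String × String)), Dom_torneo_de_gallina estrategia → Pre_torneo_de_gallina estrategia → Spec_torneo_de_gallina estrategia (torneo_de_gallina estrategia)

-- ===== LEMMAS AND PROOFS =====

-- Payoff of a scored pair (j1 < j2) to j1 (pvPay1) and to j2 (pvPay2), A's branch chain.
def pvPay1 (s1 s2 : String) : Int :=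
  if s1 == "Me desvio siempre" && s2 == "Me la banco y no me desvio" then -15
  else if s1 == "Me la banco y no me desvio" && s2 == "Me la banco y no me desvio" then -5
  else if s1 == "Me desvio siempre" && s2 == "Me desvio siempre" then -10
  else if s1 == "Me la banco y no me desvio" && s2 == "Me desvio siempre" then 10
  else 0

def pvPay2 (s1 s2 : String) : Int :=
  if s1 == "Me desvio siempre" && s2 == "Me la banco y no me desvio" then 10
  else if s1 == "Me la banco y no me desvio" && s2 == "Me la banco y no me desvio" then -5
  else if s1 == "Me desvio siempre" && s2 == "Me desvio siempre" then -10
  else if s1 == "Me la banco y no me desvio" && s2 == "Me desvio siempre" then -15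
  else 0

-- Contribution of the loop iteration (j1, j2) to the score of player k.
def pvDelta (σ : String → String) (j1 j2 k : String) : Int :=
  if j1.toList < j2.toList then
    (if k = j1 then pvPay1 (σ j1) (σ j2) else 0) + (if k = j2 then pvPay2 (σ j1) (σ j2) else 0)
  else 0

-- A's inner-loop body, named so the loop lemmas can speak about it.
def pvBody (ed : PySem.Dict String String) (j1 : String) (r : PySem.Dict String Int)
    (j2 : String) : PySem.Dict String Int :=
  if j1.toList < j2.toList then
    if ed.getD j1 "" == "Me desvio siempre" && ed.getD j2 "" == "Me la banco y no me desvio" then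
      (r.modify j1 0 (fun v => v - 15)).modify j2 0 (fun v => v + 10)
    else if ed.getD j1 "" == "Me la banco y no me desvio" && ed.getD j2 "" == "Me la banco y no me desvio" then
      (r.modify j1 0 (fun v => v - 5)).modify j2 0 (fun v => v - 5)
    else if ed.getD j1 "" == "Me desvio siempre" && ed.getD j2 "" == "Me desvio siempre" then
      (r.modify j1 0 (fun v => v - 10)).modify j2 0 (fun v => v - 10)
    else if ed.getD j1 "" == "Me la banco y no me desvio" && ed.getD j2 "" == "Me desvio siempre" then
      (r.modify j1 0 (fun v => v + 10)).modify j2 0 (fun v => v - 15)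
    else r
  else r

lemma torneo_eq_pvBody (estrategia : List (String × String)) :
    torneo_de_gallina estrategia =
      ((PySem.Dict.mk estrategia).keys.foldl
        (fun r j1 => (PySem.Dict.mk estrategia).keys.foldl (pvBody (PySem.Dict.mk estrategia) j1) r)
        ((PySem.Dict.mk estrategia).keys.foldl (fun r jugador => r.insert jugador 0) PySem.Dict.empty)).items := rfl

lemma pvBody_keys (ed : PySem.Dict String String) (r : PySem.Dict String Int) (j1 j2 : String)
    (h1 : j1 ∈ r.keys) (h2 : j2 ∈ r.keys) : (pvBody ed j1 r j2).keys = r.keys := by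
  have c1 : r.contains j1 = true := (PySem.Dict.contains_iff_mem_keys r j1).mpr h1
  have c2 : r.contains j2 = true := (PySem.Dict.contains_iff_mem_keys r j2).mpr h2
  unfold pvBody
  split_ifs <;> try rfl
  all_goals {
    have cm : ∀ (f : Int → Int), ((r.modify j1 0 f).contains j2) = true := by
      intro f; simp [PySem.Dict.contains_modify, c2]
    rw [PySem.Dict.keys_modify, PySem.Dict.keys_insert_of_contains _ _ (cm _),
        PySem.Dict.keys_modify, PySem.Dict.keys_insert_of_contains _ _ c1] }

lemma pvBody_getD (ed : PySem.Dict String String) (r : PySem.Dict String Int)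
    (j1 j2 k : String) :
    (pvBody ed j1 r j2).getD k 0 = r.getD k 0 + pvDelta (fun j => ed.getD j "") j1 j2 k := by
  by_cases hlt : j1.toList < j2.toList
  · have hne : j1 ≠ j2 := by
      intro h; rw [h] at hlt; exact lt_irrefl _ hlt
    have hne' : j2 ≠ j1 := hne.symm
    have key : ∀ (a b : Int) (f g : Int → Int), (∀ v, f v = v + a) → (∀ v, g v = v + b) →
        ((r.modify j1 0 f).modify j2 0 g).getD k 0
          = r.getD k 0 + ((if k = j1 then a else 0) + (if k = j2 then b else 0)) := by
      intro a b f g hf hg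
      simp only [PySem.Dict.getD_modify]
      by_cases hk2 : k = j2 <;> by_cases hk1 : k = j1
      · exact absurd (hk1.symm.trans hk2) hne
      · simp [hk2, hne', hg]
        try ring
      · simp [hk1, hne, hf]
        try ring
      · simp [hk2, hk1]
        try ring
    unfold pvBody
    simp only [if_pos hlt]
    split_ifs with hb1 hb2 hb3 hb4
    · rw [key (-15) 10 (fun v => v - 15) (fun v => v + 10) (fun v => by ring) (fun v => by ring)]
      unfold pvDelta pvPay1 pvPay2
      simp [hlt, hb1]
    · rw [key (-5) (-5) (fun v => v - 5) (fun v => v - 5) (fun v => by ring) (fun v => by ring)]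
      unfold pvDelta pvPay1 pvPay2
      simp [hlt, hb1, hb2]
    · rw [key (-10) (-10) (fun v => v - 10) (fun v => v - 10) (fun v => by ring) (fun v => by ring)]
      unfold pvDelta pvPay1 pvPay2
      simp [hlt, hb1, hb2, hb3]
    · rw [key 10 (-15) (fun v => v + 10) (fun v => v - 15) (fun v => by ring) (fun v => by ring)]
      unfold pvDelta pvPay1 pvPay2
      simp [hlt, hb1, hb2, hb3, hb4]
    · unfold pvDelta pvPay1 pvPay2
      simp [hlt, hb1, hb2, hb3, hb4]
  · unfold pvBody pvDelta
    simp [hlt]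

lemma pvInner (ed : PySem.Dict String String) (j1 : String) :
    ∀ (l : List String) (r : PySem.Dict String Int), j1 ∈ r.keys → (∀ j ∈ l, j ∈ r.keys) →
      (l.foldl (pvBody ed j1) r).keys = r.keys ∧
      ∀ k, (l.foldl (pvBody ed j1) r).getD k 0
            = r.getD k 0 + (l.map (fun j2 => pvDelta (fun j => ed.getD j "") j1 j2 k)).sum := by
  intro l
  induction l with
  | nil => intro r _ _; simp
  | cons a t ih =>
    intro r h1 hl
    have ha : a ∈ r.keys := hl a (List.mem_cons_self)
    have hk : (pvBody ed j1 r a).keys = r.keys := pvBody_keys ed r j1 a h1 ha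
    obtain ⟨ihk, ihg⟩ := ih (pvBody ed j1 r a) (by rw [hk]; exact h1)
      (fun j hj => by rw [hk]; exact hl j (List.mem_cons_of_mem _ hj))
    refine ⟨by rw [List.foldl_cons, ihk, hk], fun k => ?_⟩
    rw [List.foldl_cons, ihg k, pvBody_getD]
    simp [add_assoc]

lemma pvOuter (ed : PySem.Dict String String) (jug : List String) :
    ∀ (l : List String) (r : PySem.Dict String Int),
      (∀ j ∈ jug, j ∈ r.keys) → (∀ j ∈ l, j ∈ r.keys) →
      (l.foldl (fun r j1 => jug.foldl (pvBody ed j1) r) r).keys = r.keys ∧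
      ∀ k, (l.foldl (fun r j1 => jug.foldl (pvBody ed j1) r) r).getD k 0
            = r.getD k 0
              + (l.map (fun j1 => (jug.map (fun j2 => pvDelta (fun j => ed.getD j "") j1 j2 k)).sum)).sum := by
  intro l
  induction l with
  | nil => intro r _ _; simp
  | cons a t ih =>
    intro r hjug hl
    have ha : a ∈ r.keys := hl a (List.mem_cons_self)
    obtain ⟨hk, hg⟩ := pvInner ed a jug r ha hjug
    obtain ⟨ihk, ihg⟩ := ih (jug.foldl (pvBody ed a) r)
      (fun j hj => by rw [hk]; exact hjug j hj)
      (fun j hj => by rw [hk]; exact hl j (List.mem_cons_of_mem _ hj))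
    refine ⟨by rw [List.foldl_cons, ihk, hk], fun k => ?_⟩
    rw [List.foldl_cons, ihg k, hg k]
    simp [add_assoc]

-- Σ over a Nodup list, picking the single element equal to k.
lemma pvSumPick (k : String) (h : String → Int) :
    ∀ (l : List String), l.Nodup → k ∈ l →
      (l.map (fun x => if k = x then h x else 0)).sum = h k := by
  intro l
  induction l with
  | nil => intro _ hk; cases hk
  | cons a t ih =>
    intro hnd hk
    rcases List.mem_cons.mp hk with rfl | hkt
    · have hkt : k ∉ t := (List.nodup_cons.mp hnd).1
      have : (t.map (fun x => if k = x then h x else 0)).sum = 0 := by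
        apply List.sum_eq_zero
        intro x hx
        obtain ⟨y, hy, rfl⟩ := List.mem_map.mp hx
        have : k ≠ y := fun hky => hkt (hky ▸ hy)
        simp [this]
      simp [this]
    · have hka : k ≠ a := fun hka => (List.nodup_cons.mp hnd).1 (hka ▸ hkt)
      simp [hka, ih (List.nodup_cons.mp hnd).2 hkt]

lemma pvSumIfNe (k : String) (p : String → Int) :
    ∀ (l : List String), l.Nodup → k ∈ l →
      (l.map (fun j => if j = k then 0 else p j)).sum = (l.map p).sum - p k := by
  intro l
  induction l with
  | nil => intro _ hk; cases hk
  | cons a t ih =>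
    intro hnd hk
    rcases List.mem_cons.mp hk with rfl | hkt
    · have hkt : k ∉ t := (List.nodup_cons.mp hnd).1
      have : t.map (fun j => if j = k then 0 else p j) = t.map p := by
        apply List.map_congr_left
        intro x hx
        have : x ≠ k := fun hxk => hkt (hxk ▸ hx)
        simp [this]
      simp [this]
    · have hak : a ≠ k := fun hak => (List.nodup_cons.mp hnd).1 (hak ▸ hkt)
      simp [hak, ih (List.nodup_cons.mp hnd).2 hkt]
      ring

lemma pvSumTwo (a b : String) (va vb : Int) (hab : a ≠ b) :
    ∀ (l : List String),
      (l.map (fun x => if x == a then va else if x == b then vb else 0)).sum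
        = va * (l.count a : Int) + vb * (l.count b : Int) := by
  intro l
  induction l with
  | nil => simp
  | cons x t ih =>
    simp only [List.map_cons, List.sum_cons, List.count_cons, beq_iff_eq] at ih ⊢
    by_cases hxa : x = a
    · subst hxa
      rw [ih]
      simp [hab]
      ring
    · by_cases hxb : x = b
      · subst hxb
        rw [ih]
        simp [hxa]
        ring
      · rw [ih]
        simp [hxa, hxb]

lemma pvPay2_eq (s1 s2 : String) : pvPay2 s1 s2 = pvPay1 s2 s1 := by
  unfold pvPay1 pvPay2
  have h : ("Me desvio siempre" : String) ≠ "Me la banco y no me desvio" := by decide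
  split_ifs <;> simp_all [Bool.and_eq_true, beq_iff_eq]

lemma pvDoubleSum (σ : String → String) (l : List String) (hnd : l.Nodup) (k : String)
    (hk : k ∈ l) :
    (l.map (fun j1 => (l.map (fun j2 => pvDelta σ j1 j2 k)).sum)).sum
      = (l.map (fun j => pvPay1 (σ k) (σ j))).sum - pvPay1 (σ k) (σ k) := by
  have hsplit : ∀ j1, (l.map (fun j2 => pvDelta σ j1 j2 k)).sum
      = (if k = j1 then (l.map (fun j2 => if j1.toList < j2.toList then pvPay1 (σ j1) (σ j2) else 0)).sum else 0)
        + (l.map (fun j2 => if k = j2 then (if j1.toList < j2.toList then pvPay2 (σ j1) (σ j2) else 0) else 0)).sum := by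
    intro j1
    have : ∀ j2, pvDelta σ j1 j2 k
        = (if k = j1 then (if j1.toList < j2.toList then pvPay1 (σ j1) (σ j2) else 0) else 0)
          + (if k = j2 then (if j1.toList < j2.toList then pvPay2 (σ j1) (σ j2) else 0) else 0) := by
      intro j2
      unfold pvDelta
      split_ifs <;> simp
    rw [List.map_congr_left (fun j2 _ => this j2), PySem.List.sum_map_add_int]
    congr 1
    by_cases hkj : k = j1 <;> simp [hkj]
  rw [List.map_congr_left (fun j1 _ => hsplit j1), PySem.List.sum_map_add_int]
  have h1 : (l.map (fun j1 => if k = j1 then (l.map (fun j2 => if j1.toList < j2.toList then pvPay1 (σ j1) (σ j2) else 0)).sum else 0)).sum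
      = (l.map (fun j2 => if k.toList < j2.toList then pvPay1 (σ k) (σ j2) else 0)).sum :=
    pvSumPick k (fun j1 => (l.map (fun j2 => if j1.toList < j2.toList then pvPay1 (σ j1) (σ j2) else 0)).sum) l hnd hk
  have h2 : (l.map (fun j1 => (l.map (fun j2 => if k = j2 then (if j1.toList < j2.toList then pvPay2 (σ j1) (σ j2) else 0) else 0)).sum)).sum
      = (l.map (fun j1 => if j1.toList < k.toList then pvPay1 (σ k) (σ j1) else 0)).sum := by
    apply congrArg
    apply List.map_congr_left
    intro j1 _
    rw [pvSumPick k (fun j2 => if j1.toList < j2.toList then pvPay2 (σ j1) (σ j2) else 0) l hnd hk,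
        pvPay2_eq]
  rw [h1, h2, ← PySem.List.sum_map_add_int]
  have hpt : ∀ j, ((if k.toList < j.toList then pvPay1 (σ k) (σ j) else 0)
      + (if j.toList < k.toList then pvPay1 (σ k) (σ j) else 0))
      = (if j = k then 0 else pvPay1 (σ k) (σ j)) := by
    intro j
    by_cases hjk : j = k
    · subst hjk; simp
    · have hne : j.toList ≠ k.toList := fun h => hjk (String.toList_injective h)
      rcases lt_trichotomy j.toList k.toList with h | h | h
      · simp [h, asymm h, hjk]
      · exact absurd h hne
      · simp [h, asymm h, hjk]
  rw [List.map_congr_left (fun j _ => hpt j)]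
  exact pvSumIfNe k (fun j => pvPay1 (σ k) (σ j)) l hnd hk

-- Row sums of the payoff matrix, per strategy of k.
lemma pvRowSum (s : String) (vals : List String) :
    (vals.map (pvPay1 s)).sum
      = (if s == "Me desvio siempre" then
           (-15) * (vals.count "Me la banco y no me desvio" : Int) + (-10) * (vals.count "Me desvio siempre" : Int)
         else if s == "Me la banco y no me desvio" then
           (-5) * (vals.count "Me la banco y no me desvio" : Int) + 10 * (vals.count "Me desvio siempre" : Int)
         else 0) := by
  have h : ("Me la banco y no me desvio" : String) ≠ "Me desvio siempre" := by decide
  by_cases hsD : s = "Me desvio siempre"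
  · subst hsD
    rw [show (vals.map (pvPay1 "Me desvio siempre"))
        = vals.map (fun x => if x == "Me la banco y no me desvio" then -15 else if x == "Me desvio siempre" then -10 else 0) from
      List.map_congr_left (fun x _ => by unfold pvPay1; simp)]
    rw [pvSumTwo _ _ _ _ h vals]
    simp
  · by_cases hsS : s = "Me la banco y no me desvio"
    · subst hsS
      rw [show (vals.map (pvPay1 "Me la banco y no me desvio"))
          = vals.map (fun x => if x == "Me la banco y no me desvio" then -5 else if x == "Me desvio siempre" then 10 else 0) from
        List.map_congr_left (fun x _ => by unfold pvPay1; simp)]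
      rw [pvSumTwo _ _ _ _ h vals]
      simp
    · rw [show (vals.map (pvPay1 s)) = vals.map (fun _ => (0:Int)) from
        List.map_congr_left (fun x _ => by unfold pvPay1; simp [hsD, hsS])]
      simp [hsD, hsS]

-- ===== VERDICT (by name: the statement is the Claim_ definition above) =====
theorem torneo_de_gallina_spec : Claim_equal_torneo_de_gallina := by
  intro estrategia _ hP
  unfold Pre_torneo_de_gallina at hP
  unfold Spec_torneo_de_gallina
  set ed : PySem.Dict String String := PySem.Dict.mk estrategia with hed
  have heditems : ed.items = estrategia := rfl
  have hkeys : ed.keys = estrategia.map Prod.fst := by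
    rw [hed]; exact PySem.Dict.keys_mk estrategia
  have hknd : ed.keys.Nodup := by rw [hkeys]; exact hP
  -- the initial dict: every key of ed mapped to 0
  have h0items : (ed.keys.foldl (fun r jugador => r.insert jugador 0) PySem.Dict.empty).items
      = ed.keys.map (fun k => (k, (0:Int))) := by
    have := PySem.Dict.items_foldl_insert_fresh ed.keys (fun a => a) (fun _ => (0:Int))
      PySem.Dict.empty (fun a _ => PySem.Dict.contains_empty a) (by simpa using hknd)
    simpa using this
  set res0 : PySem.Dict String Int :=
    ed.keys.foldl (fun r jugador => r.insert jugador 0) PySem.Dict.empty with hres0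
  have h0keys : res0.keys = ed.keys := by
    simp only [PySem.Dict.keys, h0items, List.map_map]
    simp
  have h0getD : ∀ k ∈ ed.keys, res0.getD k 0 = 0 := by
    intro k hk
    exact PySem.Dict.getD_of_mem_items res0
      (by rw [h0items]; exact List.mem_map.mpr ⟨k, hk, rfl⟩) (by rw [h0keys]; exact hknd) 0
  -- the double loop
  obtain ⟨hrk, hrg⟩ := pvOuter ed ed.keys ed.keys res0
    (fun j hj => by rw [h0keys]; exact hj) (fun j hj => by rw [h0keys]; exact hj)
  set res := ed.keys.foldl (fun r j1 => ed.keys.foldl (pvBody ed j1) r) res0 with hres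
  have hreskeys : res.keys = ed.keys := by rw [hres, hrk, h0keys]
  -- B's side
  have hBitems : torneo_de_gallina_alt estrategia
      = estrategia.map (fun p => (p.1,
          if p.2 == "Me desvio siempre" then
            -10 * ((ed.values.count "Me desvio siempre" : Int) - 1) - 15 * (ed.values.count "Me la banco y no me desvio" : Int)
          else if p.2 == "Me la banco y no me desvio" then
            10 * (ed.values.count "Me desvio siempre" : Int) - 5 * ((ed.values.count "Me la banco y no me desvio" : Int) - 1)
          else 0)) := by
    unfold torneo_de_gallina_alt
    rw [← hed]
    have := PySem.Dict.items_foldl_insert_fresh ed.items Prod.fst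
      (fun p => if p.2 == "Me desvio siempre" then
            -10 * ((ed.values.count "Me desvio siempre" : Int) - 1) - 15 * (ed.values.count "Me la banco y no me desvio" : Int)
          else if p.2 == "Me la banco y no me desvio" then
            10 * (ed.values.count "Me desvio siempre" : Int) - 5 * ((ed.values.count "Me la banco y no me desvio" : Int) - 1)
          else 0)
      PySem.Dict.empty (fun a _ => PySem.Dict.contains_empty a.1) (by rw [heditems]; exact hP)
    rw [heditems] at this
    simpa using this
  -- A's side
  have hAitems : torneo_de_gallina estrategia = res.keys.map (fun k => (k, res.getD k 0)) := by
    rw [torneo_eq_pvBody, ← hed, ← hres0, ← hres]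
    exact PySem.Dict.items_eq_map_keys res (by rw [hreskeys]; exact hknd) 0
  rw [hAitems, hBitems, hreskeys, hkeys, List.map_map]
  apply List.map_congr_left
  intro p hp
  have hpk : p.1 ∈ ed.keys := by rw [hkeys]; exact List.mem_map.mpr ⟨p, hp, rfl⟩
  have hσ : ed.getD p.1 "" = p.2 := by
    apply PySem.Dict.getD_of_mem_items ed (k := p.1) (v := p.2)
    · rw [heditems]; simpa using hp
    · exact hknd
  have hvals : ed.values = ed.keys.map (fun j => ed.getD j "") :=
    PySem.Dict.values_eq_map_keys ed hknd ""
  have hval : res.getD p.1 0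
      = ((ed.keys.map (fun j => ed.getD j "")).map (pvPay1 (ed.getD p.1 ""))).sum
        - pvPay1 (ed.getD p.1 "") (ed.getD p.1 "") := by
    rw [hrg p.1, h0getD p.1 hpk, zero_add, List.map_map]
    exact pvDoubleSum (fun j => ed.getD j "") ed.keys hknd p.1 hpk
  have hrow := pvRowSum (ed.getD p.1 "") (ed.keys.map (fun j => ed.getD j ""))
  simp only [Function.comp_apply]
  rw [hval, hrow, ← hvals, hσ]
  have h : ("Me desvio siempre" : String) ≠ "Me la banco y no me desvio" := by decide
  by_cases hD : p.2 = "Me desvio siempre"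
  · unfold pvPay1
    simp [hD]
    ring
  · by_cases hS : p.2 = "Me la banco y no me desvio"
    · unfold pvPay1
      simp [hS]
      ring
    · unfold pvPay1
      simp [hD, hS, beq_iff_eq]
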